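-- pv_equiv track=rewrite | github.com/brianamaftei/Python2023 | lab2/main.py | rhyme
-- ===== SOURCE A (Python) =====
-- def rhyme(list_of_words):
--     list_sorted = sorted(list_of_words, key=lambda x: x[-2:])
--     list_of_lists = []
--     a_list = [list_sorted[0]]
--     for index in range(1, len(list_sorted)):
--         if list_sorted[index][-2:] == list_sorted[index - 1][-2:]:
--             a_list.append(list_sorted[index])
--         else:
--             list_of_lists.append(a_list)
--             a_list = [list_sorted[index]]
--     list_of_lists.append(a_list)
--     return list_of_lists
-- ===== SOURCE B (Python) =====
-- def rhyme(list_of_words):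
--     buckets = {}
--     for word in list_of_words:
--         buckets.setdefault(word[-2:], []).append(word)
--     return [buckets[key] for key in sorted(buckets)]
-- ===== Notes on version B (the rewrite author's own statement) =====
-- stated objective: faster
-- what changed: B replaces A's full-list stable sort followed by grouping consecutive equal-suffix runs with a single hashing pass that buckets words by their last-two-character suffix in a dict, then sorts only the distinct suffix keys and emits the buckets.
import Mathlib
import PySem

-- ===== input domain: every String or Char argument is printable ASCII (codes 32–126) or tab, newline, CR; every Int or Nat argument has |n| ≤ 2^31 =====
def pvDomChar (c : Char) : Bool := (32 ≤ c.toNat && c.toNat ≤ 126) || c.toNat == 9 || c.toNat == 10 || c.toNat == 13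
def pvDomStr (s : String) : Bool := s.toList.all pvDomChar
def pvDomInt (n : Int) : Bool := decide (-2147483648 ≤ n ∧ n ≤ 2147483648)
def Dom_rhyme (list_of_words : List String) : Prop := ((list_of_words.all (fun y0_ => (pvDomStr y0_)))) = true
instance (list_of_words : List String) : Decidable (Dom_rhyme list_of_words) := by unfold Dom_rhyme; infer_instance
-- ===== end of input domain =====

-- B groups words into suffix buckets in one pass and sorts only the distinct last-two-character keys,
-- instead of A's full-list stable sort followed by grouping consecutive equal-suffix runs.

-- ===== PORT A =====
def rhyme (list_of_words : List String) : List (List String) :=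
  let list_sorted := PySem.List.sorted list_of_words (fun x => PySem.Str.slice x (some (-2)) none)
  match PySem.List.pyGet? list_sorted 0 with  -- list_sorted[0]; none = IndexError, excluded by Pre_
  | none => []
  | some w0 =>
    let st := (PySem.List.pyRange 1 (PySem.List.len list_sorted)).foldl
      (fun (st : List (List String) × List String) index =>
        -- every index of the range is in bounds, so the pyGetD default "" is never used
        if PySem.Str.slice (PySem.List.pyGetD list_sorted index "") (some (-2)) none
             == PySem.Str.slice (PySem.List.pyGetD list_sorted (index - 1) "") (some (-2)) none
        then (st.1, st.2 ++ [PySem.List.pyGetD list_sorted index ""])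
        else (st.1 ++ [st.2], [PySem.List.pyGetD list_sorted index ""]))
      ([], [w0])
    st.1 ++ [st.2]

-- ===== PORT B =====
def rhyme_alt (list_of_words : List String) : List (List String) :=
  let buckets := list_of_words.foldl
    (fun (d : PySem.Dict String (List String)) word =>
      -- buckets.setdefault(word[-2:], []).append(word)
      d.modify (PySem.Str.slice word (some (-2)) none) [] (fun l => l ++ [word]))
    PySem.Dict.empty
  -- buckets[key] for key in sorted(buckets); every key is present, so getD's [] default is never used
  (PySem.List.sorted buckets.keys (fun x => x)).map (fun k => buckets.getD k [])

-- ===== PRECONDITION & SPEC =====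
-- Pre_ excludes only the empty list, on which A raises IndexError at list_sorted[0].
def Pre_rhyme (list_of_words : List String) : Prop := list_of_words ≠ []
instance (list_of_words : List String) : Decidable (Pre_rhyme list_of_words) := by unfold Pre_rhyme; infer_instance
def pvWitness_rhyme : List String := (["ab", "cb", "x"])

def Spec_rhyme (list_of_words : List String) (out : List (List String)) : Prop := out = rhyme_alt list_of_words
instance (list_of_words : List String) (out : List (List String)) : Decidable (Spec_rhyme list_of_words out) := by unfold Spec_rhyme; infer_instance

-- ===== CLAIM (what is proved, stated in full; the proofs are below) =====
def Claim_equal_rhyme : Prop := ∀ (list_of_words : List String), Dom_rhyme list_of_words → Pre_rhyme list_of_words → Spec_rhyme list_of_words (rhyme list_of_words)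

-- ===== LEMMAS AND PROOFS =====

-- the key function: w[-2:]
def pvKey (w : String) : String := PySem.Str.slice w (some (-2)) none
-- the bucket of suffix k in input order
def pvBucket (l : List String) (k : String) : List String := l.filter (fun w => pvKey w == k)

-- insertBy as takeWhile/dropWhile split
theorem pv_insertBy_append {α : Type} (before : α → α → Bool) (x : α) (xs ys : List α)
    (h : ∀ z ∈ xs, before x z = false) :
    PySem.List.insertBy before x (xs ++ ys) = xs ++ PySem.List.insertBy before x ys := by
  induction xs with
  | nil => simp
  | cons z zs ih =>
    simp only [List.cons_append, PySem.List.insertBy, h z (by simp)]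
    simp only [Bool.false_eq_true, if_false, List.cons.injEq, true_and]
    exact ih (fun z hz => h z (by simp [hz]))

theorem pv_sorted_append_singleton {α κ : Type} [LT κ] [DecidableLT κ] (l : List α) (w : α) (key : α → κ) :
    PySem.List.sorted (l ++ [w]) key = PySem.List.insertBy (fun a b => decide (key a < key b)) w (PySem.List.sorted l key) := by
  rw [PySem.List.sorted_eq_foldl_insertBy, PySem.List.sorted_eq_foldl_insertBy, List.foldl_append]
  rfl

theorem pv_ofList_append_singleton {α : Type} [BEq α] [LawfulBEq α] (l : List α) (x : α) :
    PySem.Set.ofList (l ++ [x]) = if x ∈ l then PySem.Set.ofList l else PySem.Set.ofList l ++ [x] := by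
  rw [PySem.Set.ofList_eq_foldl, List.foldl_append, ← PySem.Set.ofList_eq_foldl]
  simp only [List.foldl_cons, List.foldl_nil, PySem.Set.add]
  by_cases h : x ∈ l
  · simp [PySem.Set.contains, PySem.Set.mem_ofList, h]
  · simp [PySem.Set.contains, PySem.Set.mem_ofList, h]

theorem pv_insertBy_split {α : Type} (before : α → α → Bool) (x : α) (l : List α) :
    ∃ S₁ S₂, l = S₁ ++ S₂ ∧ PySem.List.insertBy before x l = S₁ ++ x :: S₂ ∧
      (∀ y ∈ S₁, before x y = false) ∧ (∀ z, S₂.head? = some z → before x z = true) := by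
  induction l with
  | nil => exact ⟨[], [], rfl, rfl, by simp, by simp⟩
  | cons y ys ih =>
    by_cases h : before x y = true
    · refine ⟨[], y :: ys, rfl, by simp [PySem.List.insertBy, h], by simp, fun z hz => ?_⟩
      simp only [List.head?_cons, Option.some.injEq] at hz
      rw [← hz]; exact h
    · obtain ⟨S₁, S₂, he, hi, h1, h2⟩ := ih
      refine ⟨y :: S₁, S₂, by simp [he], ?_, ?_, h2⟩
      · simp only [PySem.List.insertBy, h]
        simp [hi]
      · intro z hz
        rcases List.mem_cons.mp hz with hz | hz
        · rw [hz]; exact Bool.eq_false_iff.mpr h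
        · exact h1 z hz

theorem pv_bucket_key (l : List String) (k : String) : ∀ y ∈ pvBucket l k, pvKey y = k := by
  intro y hy
  have := (List.mem_filter.mp hy).2
  exact beq_iff_eq.mp this

theorem pv_bucket_ne_nil (l : List String) (k : String) (h : k ∈ l.map pvKey) : pvBucket l k ≠ [] := by
  obtain ⟨w, hw, hk⟩ := List.mem_map.mp h
  have : w ∈ pvBucket l k := List.mem_filter.mpr ⟨hw, beq_iff_eq.mpr hk⟩
  exact List.ne_nil_of_mem this

theorem pv_bucket_nil (l : List String) (k : String) (h : k ∉ l.map pvKey) : pvBucket l k = [] := by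
  rw [pvBucket, List.filter_eq_nil_iff]
  intro w hw
  simp only [beq_iff_eq]
  exact fun he => h (List.mem_map.mpr ⟨w, hw, he⟩)

theorem pv_bucket_append (l : List String) (w : String) (k : String) :
    pvBucket (l ++ [w]) k = pvBucket l k ++ if pvKey w == k then [w] else [] := by
  by_cases h : pvKey w = k <;> simp [pvBucket, List.filter_append, h]

theorem pv_flatMap_congr {α β : Type} (l : List α) (f g : α → List β) (h : ∀ a ∈ l, f a = g a) :
    l.flatMap f = l.flatMap g := by
  induction l with
  | nil => rfl
  | cons a t ih => simp [List.flatMap_cons, h a (by simp), ih (fun a ha => h a (by simp [ha]))]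

-- insert w in front of a flatMap of buckets whose first key is above pvKey w
theorem pv_insertBy_flatMap_head (w : String) (bl : String → List String) (S₂ : List String)
    (hne : ∀ k ∈ S₂, bl k ≠ []) (hkey : ∀ k ∈ S₂, ∀ y ∈ bl k, pvKey y = k)
    (hgt : ∀ k, S₂.head? = some k → pvKey w < k) :
    PySem.List.insertBy (fun a b => decide (pvKey a < pvKey b)) w (S₂.flatMap bl)
      = w :: S₂.flatMap bl := by
  cases S₂ with
  | nil => rfl
  | cons k₂ S₂' =>
    obtain ⟨z, zs, hz⟩ := List.exists_cons_of_ne_nil (hne k₂ (by simp))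
    have hkz : pvKey z = k₂ := hkey k₂ (by simp) z (by rw [hz]; simp)
    have hlt : pvKey w < k₂ := hgt k₂ rfl
    have hflat : (k₂ :: S₂').flatMap bl = z :: (zs ++ S₂'.flatMap bl) := by simp [hz]
    rw [hflat]
    simp [PySem.List.insertBy, hkz, hlt]
-- main A-side characterisation: the stable sort is the concatenation of the suffix buckets
theorem pv_sorted_eq_flatMap (l : List String) :
    PySem.List.sorted l pvKey =
      (PySem.List.sorted (PySem.Set.ofList (l.map pvKey)) (fun x => x)).flatMap (pvBucket l) := by
  induction l using List.reverseRecOn with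
  | nil => rfl
  | append_singleton l w ih =>
    have hpair : (PySem.List.sorted (PySem.Set.ofList (l.map pvKey)) (fun x => x)).Pairwise (· < ·) :=
      PySem.List.sorted_ofList_pairwise_lt (l.map pvKey)
    have hmemS : ∀ k, k ∈ PySem.List.sorted (PySem.Set.ofList (l.map pvKey)) (fun x => x) ↔ k ∈ l.map pvKey := by
      intro k
      rw [PySem.List.mem_sorted, PySem.Set.mem_ofList]
    set S := PySem.List.sorted (PySem.Set.ofList (l.map pvKey)) (fun x => x) with hSdef
    have hmap : (l ++ [w]).map pvKey = l.map pvKey ++ [pvKey w] := by simp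
    rw [pv_sorted_append_singleton, ih]
    by_cases hin : pvKey w ∈ l.map pvKey
    · -- the suffix is already present: same key list, w appended to its bucket
      have hS' : PySem.Set.ofList ((l ++ [w]).map pvKey) = PySem.Set.ofList (l.map pvKey) := by
        rw [hmap, pv_ofList_append_singleton, if_pos hin]
      obtain ⟨S₁, S₂, hsplit⟩ := List.append_of_mem ((hmemS (pvKey w)).mpr hin)
      have hp1 : ∀ y ∈ S₁, y < pvKey w := by
        intro y hy
        have := (List.pairwise_append.mp (hsplit ▸ hpair)).2.2
        exact this y hy (pvKey w) (by simp)
      have hp2 : ∀ y ∈ S₂, pvKey w < y := by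
        intro y hy
        have := List.pairwise_cons.mp (List.pairwise_append.mp (hsplit ▸ hpair)).2.1
        exact this.1 y hy
      have hSin : ∀ k ∈ S, k ∈ l.map pvKey := fun k hk => (hmemS k).mp hk
      -- LHS
      have hL : PySem.List.insertBy (fun a b => decide (pvKey a < pvKey b)) w (S.flatMap (pvBucket l))
          = S₁.flatMap (pvBucket l) ++ pvBucket l (pvKey w) ++ (w :: S₂.flatMap (pvBucket l)) := by
        rw [hsplit]
        rw [List.flatMap_append, List.flatMap_cons, ← List.append_assoc]
        rw [pv_insertBy_append]
        · rw [List.append_assoc, List.append_assoc]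
          congr 1
          congr 1
          apply pv_insertBy_flatMap_head
          · intro k hk
            exact pv_bucket_ne_nil l k (hSin k (by rw [hsplit]; simp [hk]))
          · intro k hk y hy
            exact pv_bucket_key l k y hy
          · intro k hk
            apply hp2
            cases S₂ with
            | nil => simp at hk
            | cons a t => simp at hk; simp [hk]
        · intro z hz
          rcases List.mem_append.mp hz with hz | hz
          · obtain ⟨k, hk, hzk⟩ := List.mem_flatMap.mp hz
            have := pv_bucket_key l k z hzk
            simp only [decide_eq_false_iff_not, this]
            exact fun hlt => absurd (hp1 k hk) (lt_asymm hlt)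
          · have := pv_bucket_key l (pvKey w) z hz
            simp [this]
      rw [hL, hS', ← hSdef, hsplit]
      rw [List.flatMap_append, List.flatMap_cons]
      have hb1 : S₁.flatMap (pvBucket (l ++ [w])) = S₁.flatMap (pvBucket l) := by
        apply pv_flatMap_congr
        intro k hk
        rw [pv_bucket_append]
        have : (pvKey w == k) = false := by
          simp only [beq_eq_false_iff_ne, ne_eq]
          exact fun he => absurd (hp1 k hk) (by rw [he]; exact lt_irrefl k)
        simp [this]
      have hb2 : S₂.flatMap (pvBucket (l ++ [w])) = S₂.flatMap (pvBucket l) := by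
        apply pv_flatMap_congr
        intro k hk
        rw [pv_bucket_append]
        have : (pvKey w == k) = false := by
          simp only [beq_eq_false_iff_ne, ne_eq]
          exact fun he => absurd (hp2 k hk) (by rw [he]; exact lt_irrefl k)
        simp [this]
      rw [hb1, hb2, pv_bucket_append]
      simp
    · -- fresh suffix: a new singleton bucket is inserted among the keys
      have hS' : PySem.Set.ofList ((l ++ [w]).map pvKey) = PySem.Set.ofList (l.map pvKey) ++ [pvKey w] := by
        rw [hmap, pv_ofList_append_singleton, if_neg hin]
      have hwS : pvKey w ∉ S := fun h => hin ((hmemS _).mp h)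
      obtain ⟨S₁, S₂, hsp, hins, h1, h2⟩ :=
        pv_insertBy_split (fun a b => decide ((fun x => x) a < (fun x => x) b)) (pvKey w) S
      have hsort' : PySem.List.sorted (PySem.Set.ofList ((l ++ [w]).map pvKey)) (fun x => x)
          = S₁ ++ pvKey w :: S₂ := by
        rw [hS', pv_sorted_append_singleton, ← hSdef, hins]
      have hSin : ∀ k ∈ S, k ∈ l.map pvKey := fun k hk => (hmemS k).mp hk
      have hL : PySem.List.insertBy (fun a b => decide (pvKey a < pvKey b)) w (S.flatMap (pvBucket l))
          = S₁.flatMap (pvBucket l) ++ (w :: S₂.flatMap (pvBucket l)) := by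
        rw [hsp, List.flatMap_append]
        rw [pv_insertBy_append]
        · congr 1
          apply pv_insertBy_flatMap_head
          · intro k hk
            exact pv_bucket_ne_nil l k (hSin k (by rw [hsp]; simp [hk]))
          · intro k hk y hy
            exact pv_bucket_key l k y hy
          · intro k hk
            have := h2 k hk
            simpa using this
        · intro z hz
          obtain ⟨k, hk, hzk⟩ := List.mem_flatMap.mp hz
          have hkz := pv_bucket_key l k z hzk
          have := h1 k hk
          simp only [decide_eq_false_iff_not] at this
          simp [hkz, this]
      rw [hL, hsort', List.flatMap_append, List.flatMap_cons]
      have hwb : pvBucket (l ++ [w]) (pvKey w) = [w] := by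
        rw [pv_bucket_append, pv_bucket_nil l _ hin]
        simp
      have hb1 : S₁.flatMap (pvBucket (l ++ [w])) = S₁.flatMap (pvBucket l) := by
        apply pv_flatMap_congr
        intro k hk
        rw [pv_bucket_append]
        have : (pvKey w == k) = false := by
          simp only [beq_eq_false_iff_ne, ne_eq]
          intro he
          exact hwS (by rw [he, hsp]; simp [hk])
        simp [this]
      have hb2 : S₂.flatMap (pvBucket (l ++ [w])) = S₂.flatMap (pvBucket l) := by
        apply pv_flatMap_congr
        intro k hk
        rw [pv_bucket_append]
        have : (pvKey w == k) = false := by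
          simp only [beq_eq_false_iff_ne, ne_eq]
          intro he
          exact hwS (by rw [he, hsp]; simp [hk])
        simp [this]
      rw [hb1, hb2, hwb]
      simp

-- B-side: dict characterisation
theorem pv_keys_buckets (l : List String) :
    (l.foldl (fun (d : PySem.Dict String (List String)) word =>
      d.modify (PySem.Str.slice word (some (-2)) none) [] (fun t => t ++ [word])) PySem.Dict.empty).keys
    = PySem.Set.ofList (l.map pvKey) := by
  rw [PySem.Dict.keys_foldl_modify_key l (fun w => PySem.Str.slice w (some (-2)) none) [] (fun _ w => fun t => t ++ [w]) PySem.Dict.empty]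
  simp only [PySem.Set.update, PySem.Dict.keys_empty, ← PySem.Set.ofList_eq_foldl]
  rfl

theorem pv_getD_buckets (l : List String) (k : String) :
    (l.foldl (fun (d : PySem.Dict String (List String)) word =>
      d.modify (PySem.Str.slice word (some (-2)) none) [] (fun t => t ++ [word])) PySem.Dict.empty).getD k []
    = pvBucket l k := by
  have h := PySem.Dict.getD_foldl_modify_append (l.map (fun w => (pvKey w, w))) (PySem.Dict.empty) k
  rw [List.foldl_map] at h
  simpa [pvBucket, pvKey, List.filter_map, Function.comp_def] using h

-- the grouping loop, structurally
def pvStep (st : List (List String) × List String) (p x : String) : List (List String) × List String :=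
  if pvKey x == pvKey p then (st.1, st.2 ++ [x]) else (st.1 ++ [st.2], [x])

def pvLoop (prev : String) (rest : List String) (st : List (List String) × List String) :
    List (List String) × List String :=
  match rest with
  | [] => st
  | x :: xs => pvLoop x xs (pvStep st prev x)

-- index loop = fold over adjacent pairs
theorem pv_natfold_zip (s : List String) (d : String) (st₀ : List (List String) × List String) :
    (List.range (s.length - 1)).foldl (fun st k => pvStep st (s.getD k d) (s.getD (k+1) d)) st₀
    = (s.zip s.tail).foldl (fun st p => pvStep st p.1 p.2) st₀ := by
  induction s generalizing st₀ with
  | nil => rfl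
  | cons a rest ih =>
    cases rest with
    | nil => rfl
    | cons b t =>
      simp only [List.length_cons, Nat.add_sub_cancel, List.range_succ_eq_map, List.foldl_cons,
        List.foldl_map, List.zip_cons_cons, List.tail_cons, List.getD_cons_zero, List.getD_cons_succ]
      rw [show (fun (st : List (List String) × List String) (k : ℕ) =>
            pvStep st ((b :: t).getD k d) (t.getD k d))
          = (fun st k => pvStep st ((b :: t).getD k d) ((b :: t).getD (k+1) d)) from by
            funext st k; rw [List.getD_cons_succ]]
      simpa using ih (pvStep st₀ a b)

theorem pv_zip_eq_pvLoop (rest : List String) (prev : String) (st : List (List String) × List String) :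
    ((prev :: rest).zip rest).foldl (fun st p => pvStep st p.1 p.2) st = pvLoop prev rest st := by
  induction rest generalizing prev st with
  | nil => rfl
  | cons x xs ih => simpa [pvLoop] using ih x (pvStep st prev x)

theorem pv_idx_to_zip (s : List String) (st₀ : List (List String) × List String) :
    (PySem.List.pyRange 1 (PySem.List.len s)).foldl
      (fun (st : List (List String) × List String) index =>
        if PySem.Str.slice (PySem.List.pyGetD s index "") (some (-2)) none
             == PySem.Str.slice (PySem.List.pyGetD s (index - 1) "") (some (-2)) none
        then (st.1, st.2 ++ [PySem.List.pyGetD s index ""])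
        else (st.1 ++ [st.2], [PySem.List.pyGetD s index ""])) st₀
    = (s.zip s.tail).foldl (fun st p => pvStep st p.1 p.2) st₀ := by
  cases s with
  | nil => rfl
  | cons a rest =>
    have hlen : PySem.List.len (a :: rest) = ((rest.length + 1 : ℕ) : Int) := by
      simp [PySem.List.len]
    have hr : PySem.List.pyRange 1 ((rest.length + 1 : ℕ) : Int)
        = (List.range rest.length).map (fun k => ((k + 1 : ℕ) : Int)) := by
      have h0 := PySem.List.pyRange_zero_natCast (rest.length + 1)
      rw [PySem.List.pyRange_one_cons (by exact_mod_cast Nat.succ_pos rest.length),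
        List.range_succ_eq_map, List.map_cons, List.map_map] at h0
      exact (List.cons_eq_cons.mp h0).2
    rw [hlen, hr, List.foldl_map]
    have hb : (fun (st : List (List String) × List String) (k : ℕ) =>
        (fun (st : List (List String) × List String) (index : Int) =>
          if PySem.Str.slice (PySem.List.pyGetD (a :: rest) index "") (some (-2)) none
               == PySem.Str.slice (PySem.List.pyGetD (a :: rest) (index - 1) "") (some (-2)) none
          then (st.1, st.2 ++ [PySem.List.pyGetD (a :: rest) index ""])
          else (st.1 ++ [st.2], [PySem.List.pyGetD (a :: rest) index ""])) st ((k + 1 : ℕ) : Int))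
        = (fun st k => pvStep st ((a :: rest).getD k "") ((a :: rest).getD (k + 1) "")) := by
      funext st k
      have h1 : ((k + 1 : ℕ) : Int) - 1 = (k : ℕ) := by push_cast; ring
      simp only [h1, PySem.List.pyGetD_natCast]
      rfl
    rw [hb]
    simpa using pv_natfold_zip (a :: rest) "" st₀

theorem pvLoop_run (k : String) :
    ∀ (tb : List String), (∀ y ∈ tb, pvKey y = k) →
    ∀ (prev : String) (out : List (List String)) (cur : List String) (rest : List String),
      pvKey prev = k →
      ∃ prev', pvKey prev' = k ∧
        pvLoop prev (tb ++ rest) (out, cur) = pvLoop prev' rest (out, cur ++ tb) := by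
  intro tb
  induction tb with
  | nil => intro _ prev out cur rest hp; exact ⟨prev, hp, by simp⟩
  | cons y tb' ih =>
    intro htb prev out cur rest hp
    have hy : pvKey y = k := htb y (by simp)
    have hstep : pvStep (out, cur) prev y = (out, cur ++ [y]) := by
      simp [pvStep, hy, hp]
    obtain ⟨p', hp', heq⟩ := ih (fun z hz => htb z (by simp [hz])) y out (cur ++ [y]) rest hy
    exact ⟨p', hp', by simpa [pvLoop, hstep] using heq⟩

theorem pv_group_main (b : String → List String) :
    ∀ (S : List String) (k prev : String) (tb : List String) (out : List (List String)) (cur : List String),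
      pvKey prev = k → (∀ y ∈ tb, pvKey y = k) →
      (∀ k' ∈ S, b k' ≠ [] ∧ ∀ y ∈ b k', pvKey y = k') →
      (k :: S).Pairwise (· < ·) →
      (pvLoop prev (tb ++ S.flatMap b) (out, cur)).1 ++ [(pvLoop prev (tb ++ S.flatMap b) (out, cur)).2]
        = out ++ [cur ++ tb] ++ S.map b := by
  intro S
  induction S with
  | nil =>
    intro k prev tb out cur hp htb _ _
    obtain ⟨p', _, heq⟩ := pvLoop_run k tb htb prev out cur [] hp
    simp only [List.flatMap_nil, heq, pvLoop]
    simp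
  | cons k' S' ih =>
    intro k prev tb out cur hp htb hb hpair
    obtain ⟨p', hp', heq⟩ := pvLoop_run k tb htb prev out cur ((k' :: S').flatMap b) hp
    rw [heq]
    obtain ⟨hne, hkey⟩ := hb k' (by simp)
    obtain ⟨z, zs, hz⟩ := List.exists_cons_of_ne_nil hne
    have hkz : pvKey z = k' := hkey z (by rw [hz]; simp)
    have hkk' : k ≠ k' := by
      have := (List.pairwise_cons.mp hpair).1 k' (by simp)
      exact ne_of_lt this
    have hstep : pvStep (out, cur ++ tb) p' z = (out ++ [cur ++ tb], [z]) := by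
      have : (pvKey z == pvKey p') = false := by
        simp [hkz, hp']; exact fun h => hkk' h.symm
      simp [pvStep, this]
    have hflat : (k' :: S').flatMap b = z :: (zs ++ S'.flatMap b) := by
      simp [hz]
    rw [hflat]
    simp only [pvLoop, hstep]
    have ihres := ih k' z zs (out ++ [cur ++ tb]) [z] hkz
      (fun y hy => hkey y (by rw [hz]; simp [hy]))
      (fun kk hkk => hb kk (by simp [hkk]))
      ((List.pairwise_cons.mp hpair).2)
    rw [ihres]
    simp [hz]

-- ===== VERDICT (by name: the statement is the Claim_ definition above) =====
theorem pv_pyGet?_cons_zero {α : Type} (x : α) (xs : List α) :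
    PySem.List.pyGet? (x :: xs) 0 = some x := by
  simp [PySem.List.pyGet?, PySem.List.pyIdx?]

theorem rhyme_spec : Claim_equal_rhyme := by
  intro l _ hpre
  show rhyme l = rhyme_alt l
  obtain ⟨x, l', rfl⟩ := List.exists_cons_of_ne_nil hpre
  set l := x :: l' with hl
  set S := PySem.List.sorted (PySem.Set.ofList (l.map pvKey)) (fun x => x) with hSdef
  have hmemS : ∀ k, k ∈ S ↔ k ∈ l.map pvKey := by
    intro k
    rw [hSdef, PySem.List.mem_sorted, PySem.Set.mem_ofList]
  have hpair : S.Pairwise (· < ·) := PySem.List.sorted_ofList_pairwise_lt (l.map pvKey)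
  have hSne : S ≠ [] := by
    intro h
    have : pvKey x ∈ S := (hmemS _).mpr (by rw [hl]; simp)
    rw [h] at this
    simp at this
  obtain ⟨k0, S0, hS0⟩ := List.exists_cons_of_ne_nil hSne
  have hk0 : k0 ∈ l.map pvKey := (hmemS k0).mp (by rw [hS0]; simp)
  obtain ⟨w0, tb0, hw0⟩ := List.exists_cons_of_ne_nil (pv_bucket_ne_nil l k0 hk0)
  have hkw0 : pvKey w0 = k0 := pv_bucket_key l k0 w0 (by rw [hw0]; simp)
  have htb0 : ∀ y ∈ tb0, pvKey y = k0 := fun y hy => pv_bucket_key l k0 y (by rw [hw0]; simp [hy])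
  have hs : PySem.List.sorted l (fun x => PySem.Str.slice x (some (-2)) none)
      = w0 :: (tb0 ++ S0.flatMap (pvBucket l)) := by
    have h1 : PySem.List.sorted l pvKey = w0 :: (tb0 ++ S0.flatMap (pvBucket l)) := by
      rw [pv_sorted_eq_flatMap, ← hSdef, hS0, List.flatMap_cons, hw0]
      simp
    exact h1
  -- A side
  have hA : rhyme l = [[w0] ++ tb0] ++ S0.map (pvBucket l) := by
    rw [rhyme]
    simp only [hs, pv_pyGet?_cons_zero]
    rw [pv_idx_to_zip (w0 :: (tb0 ++ S0.flatMap (pvBucket l))) ([], [w0])]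
    simp only [List.tail_cons]
    rw [pv_zip_eq_pvLoop]
    exact pv_group_main (pvBucket l) S0 k0 w0 tb0 [] [w0] hkw0 htb0
      (fun k' hk' => ⟨pv_bucket_ne_nil l k' ((hmemS k').mp (by rw [hS0]; simp [hk'])),
        fun y hy => pv_bucket_key l k' y hy⟩)
      (by rw [← hS0]; exact hpair)
  -- B side
  have hB : rhyme_alt l = (k0 :: S0).map (pvBucket l) := by
    rw [rhyme_alt]
    simp only [pv_keys_buckets l, ← hSdef, hS0]
    have hg : (fun k => (l.foldl (fun (d : PySem.Dict String (List String)) word =>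
        d.modify (PySem.Str.slice word (some (-2)) none) [] (fun t => t ++ [word]))
        PySem.Dict.empty).getD k []) = pvBucket l := funext (pv_getD_buckets l)
    rw [hg]
  rw [hA, hB]
  simp [hw0]
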